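-- pv_equiv track=rewrite | github.com/ismihankrmz/convex_hull | convex_hull.py | _collinear_endpoint_filter
-- ===== SOURCE A (Python) =====
-- def orientation(p, q, r):
--     """
--     p, q, r noktalarının dönüş yönünü belirler (2B çapraz çarpım işareti).
--
--     Hesap: (q - p) x (r - p)
--     - > 0: sol dönüş (counter-clockwise)
--     - < 0: sağ dönüş (clockwise)
--     - = 0: kolinear (aynı doğru üzerinde)
--
--     Zaman: O(1)
--     """
--     # Aşağıdaki ifade, 2B determinanta karşılık gelir:
--     return (q[0] - p[0]) * (r[1] - p[1]) - (q[1] - p[1]) * (r[0] - p[0])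
--
-- def _collinear_endpoint_filter(p, q, noktalar):
--     """
--     KOLİNEAR (aynı doğru üstü) durumlarda gereksiz 'iç' segmentleri elemek için.
--
--     Amaç:
--     - Brute force kenar adayları içinde, aynı doğru üstünde birden çok nokta olabilir.
--     - Hull kenarı, o doğru üzerindeki EN UÇTAKİ iki nokta arasında olmalıdır.
--     - p-q o doğrultuda uç noktalar değilse bu segment içte kalır -> elenir.
--
--     Zaman: O(n)
--     """
--     dx = q[0] - p[0]  # doğrultu vektörü x bileşeni
--     dy = q[1] - p[1]  # doğrultu vektörü y bileşeni
--
--     if dx == 0 and dy == 0: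
--         return False  # p ve q aynı nokta ise geçersiz
--
--     # Bir noktayı doğrultuya projekte etmek için skaler değer
--     def proj(t):
--         return t[0] * dx + t[1] * dy  # dot((t), (dx,dy)) gibi düşün
--
--     min_val = None  # doğrultu üzerindeki en küçük projeksiyon
--     max_val = None  # doğrultu üzerindeki en büyük projeksiyon
--
--     pproj = proj(p)  # p'nin projeksiyonu
--     qproj = proj(q)  # q'nun projeksiyonu
--
--     for r in noktalar:  # tüm noktalar içinde dolaş -> O(n)
--         if orientation(p, q, r) == 0:  # r, p-q doğrusu üzerinde mi?
--             v = proj(r)  # r'nin projeksiyonu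
--             if min_val is None or v < min_val:
--                 min_val = v  # minimumu güncelle
--             if max_val is None or v > max_val:
--                 max_val = v  # maksimumu güncelle
--
--     # p ve q, bu doğru üzerindeki uçlarda olmalı (min ve max projeksiyon)
--     return (pproj == min_val and qproj == max_val) or (
--         pproj == max_val and qproj == min_val
--     )
-- ===== SOURCE B (Python) =====
-- def _collinear_endpoint_filter(p, q, noktalar):
--     dx = q[0] - p[0]
--     dy = q[1] - p[1]
--     if dx == 0 and dy == 0:
--         return False
--     # projections of the collinear points, sorted ascending
--     vs = sorted(r[0] * dx + r[1] * dy
--                 for r in noktalar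
--                 if dx * (r[1] - p[1]) == dy * (r[0] - p[0]))
--     if not vs:
--         return False
--     # proj(q) - proj(p) = dx*dx + dy*dy > 0, so p must sit at the low end, q at the high end
--     return vs[0] == p[0] * dx + p[1] * dy and vs[-1] == q[0] * dx + q[1] * dy
-- ===== Notes on version B (the rewrite author's own statement) =====
-- stated objective: alternative
-- what changed: B collects the projections of the collinear points into a sorted list and just inspects its first and last element (using that proj(q)-proj(p)=dx^2+dy^2>0, so no symmetric disjunction and no Optional min/max tracking), instead of A's single pass with None-initialised running min/max and a two-way endpoint comparison.
import Mathlib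
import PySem

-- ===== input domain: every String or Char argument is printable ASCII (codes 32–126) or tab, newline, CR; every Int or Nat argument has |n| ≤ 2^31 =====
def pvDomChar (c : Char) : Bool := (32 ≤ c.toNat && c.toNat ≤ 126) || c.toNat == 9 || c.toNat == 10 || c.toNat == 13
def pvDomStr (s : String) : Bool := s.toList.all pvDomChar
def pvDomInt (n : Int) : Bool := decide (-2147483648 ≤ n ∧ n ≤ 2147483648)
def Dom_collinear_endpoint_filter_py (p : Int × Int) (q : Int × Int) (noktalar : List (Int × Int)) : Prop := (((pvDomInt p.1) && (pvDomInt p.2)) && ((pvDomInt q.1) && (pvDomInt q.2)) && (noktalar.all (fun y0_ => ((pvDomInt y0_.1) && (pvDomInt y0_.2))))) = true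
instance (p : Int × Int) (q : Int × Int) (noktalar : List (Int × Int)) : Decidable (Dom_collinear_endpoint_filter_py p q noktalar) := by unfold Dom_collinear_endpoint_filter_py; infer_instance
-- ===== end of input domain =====

-- B sorts the projections of the collinear points and inspects the first and last element,
-- instead of A's running Optional min/max with a two-way endpoint comparison; return value only.

-- ===== PORT A =====
-- helper `orientation` from the module
def orientation (p q r : Int × Int) : Int :=
  (q.1 - p.1) * (r.2 - p.2) - (q.2 - p.2) * (r.1 - p.1)

-- the local `proj(t)` closure (dx, dy passed explicitly)
def projA (dx dy : Int) (t : Int × Int) : Int := t.1 * dx + t.2 * dy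

-- Python `int == None` is False: equality of an int with an Optional int
def eqOptInt (v : Int) (o : Option Int) : Bool :=
  match o with
  | none => false
  | some m => v == m

-- the body of A's `for r in noktalar` loop, acting on (min_val, max_val)
def stepA (p q : Int × Int) (dx dy : Int) (s : Option Int × Option Int)
    (r : Int × Int) : Option Int × Option Int :=
  if orientation p q r = 0 then
    let v := projA dx dy r
    ((match s.1 with
      | none => some v
      | some m => if v < m then some v else some m),
     (match s.2 with
      | none => some v
      | some m => if v > m then some v else some m))
  else s

def collinear_endpoint_filter_py (p : Int × Int) (q : Int × Int) (noktalar : List (Int × Int)) : Bool :=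
  let dx := q.1 - p.1
  let dy := q.2 - p.2
  if dx = 0 ∧ dy = 0 then false
  else
    let pproj := projA dx dy p
    let qproj := projA dx dy q
    let st := noktalar.foldl (stepA p q dx dy) (none, none)
    (eqOptInt pproj st.1 && eqOptInt qproj st.2) ||
    (eqOptInt pproj st.2 && eqOptInt qproj st.1)

-- ===== PORT B =====
-- B's list of projections of the collinear points (the generator inside `sorted`)
def projsB (p : Int × Int) (dx dy : Int) (noktalar : List (Int × Int)) : List Int :=
  (noktalar.filter (fun r => dx * (r.2 - p.2) == dy * (r.1 - p.1))).map
    (fun r => r.1 * dx + r.2 * dy)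

def collinear_endpoint_filter_py_alt (p : Int × Int) (q : Int × Int) (noktalar : List (Int × Int)) : Bool :=
  let dx := q.1 - p.1
  let dy := q.2 - p.2
  if dx = 0 ∧ dy = 0 then false
  else
    match PySem.List.sorted (projsB p dx dy noktalar) (fun x => x) false with
    | [] => false
    | v0 :: t =>
      v0 == p.1 * dx + p.2 * dy && (v0 :: t).getLast (by simp) == q.1 * dx + q.2 * dy

-- ===== PRECONDITION & SPEC =====
def Spec_collinear_endpoint_filter_py (p : Int × Int) (q : Int × Int) (noktalar : List (Int × Int)) (out : Bool) : Prop := out = collinear_endpoint_filter_py_alt p q noktalar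
instance (p : Int × Int) (q : Int × Int) (noktalar : List (Int × Int)) (out : Bool) : Decidable (Spec_collinear_endpoint_filter_py p q noktalar out) := by unfold Spec_collinear_endpoint_filter_py; infer_instance

-- ===== CLAIM (what is proved, stated in full; the proofs are below) =====
def Claim_equal_collinear_endpoint_filter_py : Prop := ∀ (p : Int × Int) (q : Int × Int) (noktalar : List (Int × Int)), Dom_collinear_endpoint_filter_py p q noktalar → Spec_collinear_endpoint_filter_py p q noktalar (collinear_endpoint_filter_py p q noktalar)

-- ===== LEMMAS AND PROOFS =====

-- min/max step on plain Ints (A's loop once both optionals are set)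
def mm (s : Int × Int) (v : Int) : Int × Int :=
  ((if v < s.1 then v else s.1), (if v > s.2 then v else s.2))

-- A's fold over noktalar is the mm-fold over B's projection list
lemma foldA_eq_mm (p q : Int × Int) (dx dy : Int)
    (hdx : dx = q.1 - p.1) (hdy : dy = q.2 - p.2) (l : List (Int × Int)) :
    ∀ (s : Option Int × Option Int),
    l.foldl (stepA p q dx dy) s =
      (projsB p dx dy l).foldl
        (fun (s' : Option Int × Option Int) v =>
          ((match s'.1 with | none => some v | some m => if v < m then some v else some m),
           (match s'.2 with | none => some v | some m => if v > m then some v else some m))) s := by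
  induction l with
  | nil => intro s; rfl
  | cons r t ih =>
    intro s
    have hcond : (orientation p q r = 0) ↔
        ((dx * (r.2 - p.2) == dy * (r.1 - p.1)) = true) := by
      subst hdx hdy
      unfold orientation
      constructor
      · intro h; simp only [beq_iff_eq]; omega
      · intro h; simp only [beq_iff_eq] at h; omega
    simp only [List.foldl_cons, projsB, List.filter_cons]
    by_cases hc : orientation p q r = 0
    · rw [hcond] at hc
      simp only [hc]
      have : stepA p q dx dy s r =
          ((match s.1 with | none => some (projA dx dy r) | some m => if projA dx dy r < m then some (projA dx dy r) else some m),
           (match s.2 with | none => some (projA dx dy r) | some m => if projA dx dy r > m then some (projA dx dy r) else some m)) := by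
        unfold stepA
        rw [if_pos (hcond.mpr hc)]
      rw [this]
      have := ih ((match s.1 with | none => some (projA dx dy r) | some m => if projA dx dy r < m then some (projA dx dy r) else some m),
           (match s.2 with | none => some (projA dx dy r) | some m => if projA dx dy r > m then some (projA dx dy r) else some m))
      rw [this]
      rfl
    · have hc' : (dx * (r.2 - p.2) == dy * (r.1 - p.1)) = false := by
        by_contra h
        exact hc (hcond.mpr (by revert h; cases (dx * (r.2 - p.2) == dy * (r.1 - p.1)) <;> simp))
      simp only [hc']
      have : stepA p q dx dy s r = s := by unfold stepA; rw [if_neg (by rw [hcond, hc']; simp)]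
      rw [this]
      exact ih s
    
-- the optional fold on some-some states is the plain mm fold
lemma foldOpt_some (l : List Int) : ∀ (m M : Int),
    l.foldl
      (fun (s' : Option Int × Option Int) v =>
        ((match s'.1 with | none => some v | some m => if v < m then some v else some m),
         (match s'.2 with | none => some v | some m => if v > m then some v else some m)))
      (some m, some M)
    = (some (l.foldl mm (m, M)).1, some (l.foldl mm (m, M)).2) := by
  induction l with
  | nil => intro m M; rfl
  | cons v t ih =>
    intro m M
    simp only [List.foldl_cons]
    rw [show ((if v < m then some v else some m : Option Int), (if v > M then some v else some M : Option Int)) = (some (if v < m then v else m), some (if v > M then v else M)) by split_ifs <;> rfl]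
    rw [ih]
    rfl

-- the mm fold yields a member lower bound and a member upper bound
lemma mm_fold_min_mem (l : List Int) : ∀ (m M : Int),
    (l.foldl mm (m, M)).1 = m ∨ (l.foldl mm (m, M)).1 ∈ l := by
  induction l with
  | nil => intro m M; exact Or.inl rfl
  | cons v t ih =>
    intro m M
    simp only [List.foldl_cons, mm, List.mem_cons]
    by_cases h : v < m
    · rw [if_pos h]
      rcases ih v (if v > M then v else M) with h' | h'
      · exact Or.inr (Or.inl h')
      · exact Or.inr (Or.inr h')
    · rw [if_neg h]
      rcases ih m (if v > M then v else M) with h' | h'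
      · exact Or.inl h'
      · exact Or.inr (Or.inr h')

lemma mm_fold_max_mem (l : List Int) : ∀ (m M : Int),
    (l.foldl mm (m, M)).2 = M ∨ (l.foldl mm (m, M)).2 ∈ l := by
  induction l with
  | nil => intro m M; exact Or.inl rfl
  | cons v t ih =>
    intro v' M
    simp only [List.foldl_cons, mm, List.mem_cons]
    by_cases h : v > M
    · rw [if_pos h]
      rcases ih (if v < v' then v else v') v with h' | h'
      · exact Or.inr (Or.inl h')
      · exact Or.inr (Or.inr h')
    · rw [if_neg h]
      rcases ih (if v < v' then v else v') M with h' | h'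
      · exact Or.inl h'
      · exact Or.inr (Or.inr h')

lemma mm_bound (m M v : Int) :
    (mm (m, M) v).1 ≤ m ∧ (mm (m, M) v).1 ≤ v ∧ M ≤ (mm (m, M) v).2 ∧ v ≤ (mm (m, M) v).2 := by
  unfold mm
  refine ⟨?_, ?_, ?_, ?_⟩ <;> simp only [] <;> split_ifs <;> omega

lemma mm_fold_spec (l : List Int) : ∀ (m M : Int),
    (l.foldl mm (m, M)).1 ≤ m ∧ M ≤ (l.foldl mm (m, M)).2 ∧
      ∀ x ∈ l, (l.foldl mm (m, M)).1 ≤ x ∧ x ≤ (l.foldl mm (m, M)).2 := by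
  induction l with
  | nil =>
    intro m M
    exact ⟨le_refl m, le_refl M, by intro x hx; cases hx⟩
  | cons v t ih =>
    intro m M
    simp only [List.foldl_cons]
    obtain ⟨h1, h2, h3⟩ := ih (mm (m, M) v).1 (mm (m, M) v).2
    have heta : ((mm (m, M) v).1, (mm (m, M) v).2) = mm (m, M) v := rfl
    rw [heta] at h1 h2 h3
    obtain ⟨b1, b2, b3, b4⟩ := mm_bound m M v
    refine ⟨by omega, by omega, ?_⟩
    intro x hx
    rcases List.mem_cons.mp hx with rfl | hx
    · exact ⟨by omega, by omega⟩
    · exact h3 x hx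

-- last element of a (≤)-pairwise list bounds every element from above
lemma pairwise_le_getLast (l : List Int) (h : l.Pairwise (· ≤ ·)) (hne : l ≠ []) :
    ∀ x ∈ l, x ≤ l.getLast hne := by
  induction l with
  | nil => exact absurd rfl hne
  | cons v t ih =>
    intro x hx
    rcases List.pairwise_cons.mp h with ⟨hv, ht⟩
    cases t with
    | nil =>
      rcases List.mem_cons.mp hx with rfl | hx
      · simp [List.getLast]
      · cases hx
    | cons w u =>
      have hlast : (v :: w :: u).getLast hne = (w :: u).getLast (by simp) := by
        simp [List.getLast]
      rw [hlast]
      rcases List.mem_cons.mp hx with rfl | hx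
      · exact le_trans (hv w (by simp)) (ih ht (by simp) w (by simp))
      · exact ih ht (by simp) x hx

-- proj(q) - proj(p) = dx^2 + dy^2 > 0
lemma proj_lt (p q : Int × Int) (h : ¬ (q.1 - p.1 = 0 ∧ q.2 - p.2 = 0)) :
    projA (q.1 - p.1) (q.2 - p.2) p < projA (q.1 - p.1) (q.2 - p.2) q := by
  unfold projA
  set dx := q.1 - p.1 with hdx
  set dy := q.2 - p.2 with hdy
  have hkey : q.1 * dx + q.2 * dy - (p.1 * dx + p.2 * dy) = dx * dx + dy * dy := by
    rw [hdx, hdy]; ring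
  have hpos : 0 < dx * dx + dy * dy := by
    rcases not_and_or.mp h with h' | h'
    · have h1 : 0 < dx * dx := mul_self_pos.mpr h'
      have h2 : 0 ≤ dy * dy := mul_self_nonneg dy
      omega
    · have h1 : 0 < dy * dy := mul_self_pos.mpr h'
      have h2 : 0 ≤ dx * dx := mul_self_nonneg dx
      omega
  omega

-- ===== VERDICT (by name: the statement is the Claim_ definition above) =====
theorem collinear_endpoint_filter_py_spec : Claim_equal_collinear_endpoint_filter_py := by
  intro p q noktalar _
  unfold Spec_collinear_endpoint_filter_py
  unfold collinear_endpoint_filter_py collinear_endpoint_filter_py_alt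
  by_cases hz : (q.1 - p.1 = 0 ∧ q.2 - p.2 = 0)
  · rw [if_pos hz, if_pos hz]
  · simp only [if_neg hz]
    set dx := q.1 - p.1 with hdx
    set dy := q.2 - p.2 with hdy
    have hlt : projA dx dy p < projA dx dy q := proj_lt p q hz
    set pp := projA dx dy p with hpp
    set qq := projA dx dy q with hqq
    rw [foldA_eq_mm p q dx dy hdx hdy noktalar (none, none)]
    set vs := projsB p dx dy noktalar with hvs
    cases hvsc : vs with
    | nil =>
      have hnil : PySem.List.sorted ([] : List Int) (fun x => x) false = [] :=
        (PySem.List.sorted_eq_nil_iff [] (fun x => x) false).mpr rfl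
      rw [hnil]
      rfl
    | cons v0 t0 =>
      have hsne : PySem.List.sorted vs (fun x => x) false ≠ [] := by
        intro h
        rw [(PySem.List.sorted_eq_nil_iff vs (fun x => x) false).mp h] at hvsc
        cases hvsc
      cases hsc : PySem.List.sorted vs (fun x => x) false with
      | nil => exact absurd hsc hsne
      | cons s0 st =>
        simp only [List.foldl_cons]
        -- A side: m,M from the mm-fold over t0 starting at (v0,v0)
        rw [show ((match (none : Option Int) with | none => some v0 | some m => if v0 < m then some v0 else some m),
             (match (none : Option Int) with | none => some v0 | some m => if v0 > m then some v0 else some m)) = ((some v0 : Option Int), (some v0 : Option Int)) from rfl]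
        rw [foldOpt_some t0 v0 v0]
        set m := (t0.foldl mm (v0, v0)).1 with hm
        set M := (t0.foldl mm (v0, v0)).2 with hM
        -- properties of m, M over vs = v0 :: t0
        have hmmem : m ∈ vs := by
          rw [hvsc]
          rcases mm_fold_min_mem t0 v0 v0 with h | h
          · exact h ▸ List.mem_cons_self
          · exact List.mem_cons_of_mem _ h
        have hMmem : M ∈ vs := by
          rw [hvsc]
          rcases mm_fold_max_mem t0 v0 v0 with h | h
          · exact h ▸ List.mem_cons_self
          · exact List.mem_cons_of_mem _ h
        obtain ⟨hsp1, hsp2, hsp3⟩ := mm_fold_spec t0 v0 v0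
        have hmle : ∀ x ∈ vs, m ≤ x := by
          rw [hvsc]
          intro x hx
          rcases List.mem_cons.mp hx with rfl | hx
          · exact hsp1
          · exact (hsp3 x hx).1
        have hMge : ∀ x ∈ vs, x ≤ M := by
          rw [hvsc]
          intro x hx
          rcases List.mem_cons.mp hx with rfl | hx
          · exact hsp2
          · exact (hsp3 x hx).2
        -- B side: s0 is the minimum of vs, last is the maximum
        have hs0mem : s0 ∈ vs := by
          have : s0 ∈ PySem.List.sorted vs (fun x => x) false := by rw [hsc]; simp
          exact (PySem.List.mem_sorted vs (fun x => x) false _).mp this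
        have hs0le : ∀ x ∈ vs, s0 ≤ x := by
          intro x hx
          exact PySem.List.key_head_sorted_le vs (fun x => x) hsc x hx
        set ls := (s0 :: st).getLast (by simp) with hls
        have hlsmem : ls ∈ vs := by
          have : ls ∈ PySem.List.sorted vs (fun x => x) false := by
            rw [hsc]; exact List.getLast_mem _
          exact (PySem.List.mem_sorted vs (fun x => x) false _).mp this
        have hlsge : ∀ x ∈ vs, x ≤ ls := by
          intro x hx
          have hpw : (PySem.List.sorted vs (fun x => x) false).Pairwise (· ≤ ·) := by
            exact PySem.List.sorted_pairwise vs (fun x => x)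
          rw [hsc] at hpw
          have hxmem : x ∈ (s0 :: st) := by
            rw [← hsc]; exact (PySem.List.mem_sorted vs (fun x => x) false _).mpr hx
          exact pairwise_le_getLast (s0 :: st) hpw (by simp) x hxmem
        -- s0 = m, ls = M
        have hs0m : s0 = m := le_antisymm (hs0le m hmmem) (hmle s0 hs0mem)
        have hlsM : ls = M := le_antisymm (hMge ls hlsmem) (hlsge M hMmem)
        -- now compare the two boolean results
        have hmM : m ≤ M := le_trans (hmle M hMmem) (le_refl M)
        simp only [eqOptInt]
        rw [← hvsc, hsc]
        have hgl : (s0 :: st).getLast (List.cons_ne_nil s0 st) = ls := hls.symm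
        show (pp == m && qq == M || pp == M && qq == m) =
          (s0 == p.1 * dx + p.2 * dy && (s0 :: st).getLast (List.cons_ne_nil s0 st) == q.1 * dx + q.2 * dy)
        rw [hgl, hs0m, hlsM,
          show p.1 * dx + p.2 * dy = pp from rfl, show q.1 * dx + q.2 * dy = qq from rfl]
        apply Bool.eq_iff_iff.mpr
        simp only [Bool.or_eq_true, Bool.and_eq_true, beq_iff_eq]
        omega
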